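-- pv_equiv track=rewrite | github.com/flaviokicis/chatai | backend/app/flow_core/engine.py | _match_path_key
-- ===== SOURCE A (Python) =====
-- def _match_path_key(candidate: str, available: list[str]) -> str | None:
--     """Match a free-text candidate to one of the available path keys."""
--     if not isinstance(candidate, str) or not available:
--         return None
--     cand = candidate.strip().lower()
--     if cand in (a.lower() for a in available):
--         # Exact (case-insensitive) match
--         return next(a for a in available if a.lower() == cand)
--     # Try substring match case-insensitively
--     for a in available:
--         al = a.lower()
--         if cand in al or al in cand:
--             return a
--     return None
-- ===== SOURCE B (Python) =====
-- def _match_path_key(candidate: str, available: list[str]) -> str | None: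
--     """Single pass: exact (case-insensitive) match returns immediately; the
--     first substring match is remembered and returned only if no exact match."""
--     if not isinstance(candidate, str) or not available:
--         return None
--     cand = candidate.strip().lower()
--     first_substring = None
--     for a in available:
--         al = a.lower()
--         if al == cand:
--             return a
--         if first_substring is None and (cand in al or al in cand):
--             first_substring = a
--     return first_substring
-- ===== Notes on version B (the rewrite author's own statement) =====
-- stated objective: alternative
-- what changed: Replaces A's three scans (membership test over lowered keys, a second scan to retrieve the exact match, then a substring-scan loop) with one loop over available that returns an exact match immediately and keeps the first substring match in an accumulator.
import Mathlib
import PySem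

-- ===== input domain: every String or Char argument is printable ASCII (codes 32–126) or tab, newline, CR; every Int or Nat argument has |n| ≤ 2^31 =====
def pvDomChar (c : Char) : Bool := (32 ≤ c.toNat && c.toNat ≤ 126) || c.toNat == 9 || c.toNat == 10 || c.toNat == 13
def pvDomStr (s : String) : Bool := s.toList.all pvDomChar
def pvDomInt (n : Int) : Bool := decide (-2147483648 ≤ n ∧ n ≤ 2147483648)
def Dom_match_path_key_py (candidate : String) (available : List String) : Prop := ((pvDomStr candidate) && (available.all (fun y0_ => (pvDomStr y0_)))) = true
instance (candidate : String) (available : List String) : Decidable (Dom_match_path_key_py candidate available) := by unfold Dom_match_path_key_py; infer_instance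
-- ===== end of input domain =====

-- One honest line: B merges A's exact-match scans and substring scan into a single
-- traversal with a first-substring accumulator; same O(n·m) cost, one pass.

-- ===== PORT A =====
-- A: guard, then membership test over lowered keys + retrieval of the first exact
-- match, else a scan for the first substring match.
def match_path_key_py (candidate : String) (available : List String) : Option String :=
  if available = [] then none
  else
    let cand := PySem.Str.lower (PySem.Str.strip candidate)
    if (available.map (fun a => PySem.Str.lower a)).contains cand then
      -- next(a for a in available if a.lower() == cand)
      available.find? (fun a => PySem.Str.lower a == cand)
    else
      -- for a in available: al = a.lower(); if cand in al or al in cand: return a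
      available.find? (fun a =>
        let al := PySem.Str.lower a
        PySem.Str.isIn cand al || PySem.Str.isIn al cand)

-- ===== PORT B =====
-- B: one loop carrying the first substring match; exact match returns at once.
def matchPathKeyGo (cand : String) : List String → Option String → Option String
  | [], firstSub => firstSub
  | a :: rest, firstSub =>
    let al := PySem.Str.lower a
    if al == cand then some a
    else
      matchPathKeyGo cand rest
        (if firstSub.isNone && (PySem.Str.isIn cand al || PySem.Str.isIn al cand)
         then some a else firstSub)

def match_path_key_py_alt (candidate : String) (available : List String) : Option String :=
  if available = [] then none
  else matchPathKeyGo (PySem.Str.lower (PySem.Str.strip candidate)) available none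

-- ===== PRECONDITION & SPEC =====
def Spec_match_path_key_py (candidate : String) (available : List String) (out : Option String) : Prop := out = match_path_key_py_alt candidate available
instance (candidate : String) (available : List String) (out : Option String) : Decidable (Spec_match_path_key_py candidate available out) := by unfold Spec_match_path_key_py; infer_instance

-- ===== CLAIM (what is proved, stated in full; the proofs are below) =====
def Claim_equal_match_path_key_py : Prop := ∀ (candidate : String) (available : List String), Dom_match_path_key_py candidate available → Spec_match_path_key_py candidate available (match_path_key_py candidate available)

-- ===== LEMMAS AND PROOFS =====

-- Characterisation of B's loop: an exact match anywhere wins; otherwise the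
-- accumulator (if set) wins; otherwise the first substring match.
theorem matchPathKeyGo_eq (cand : String) (xs : List String) (firstSub : Option String) :
    matchPathKeyGo cand xs firstSub =
      match xs.find? (fun a => PySem.Str.lower a == cand) with
      | some a => some a
      | none =>
        match firstSub with
        | some f => some f
        | none => xs.find? (fun a =>
            let al := PySem.Str.lower a
            PySem.Str.isIn cand al || PySem.Str.isIn al cand) := by
  induction xs generalizing firstSub with
  | nil => cases firstSub <;> simp [matchPathKeyGo]
  | cons a rest ih =>
    by_cases hex : (PySem.Str.lower a == cand) = true
    · rw [List.find?_cons_of_pos (p := fun a => PySem.Str.lower a == cand) hex]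
      simp only [matchPathKeyGo, hex, if_true]
    · have hexf : (PySem.Str.lower a == cand) = false := by
        simpa using hex
      rw [List.find?_cons_of_neg (p := fun a => PySem.Str.lower a == cand) (by simp [hexf])]
      simp only [matchPathKeyGo, hexf, Bool.false_eq_true, if_false]
      rw [ih]
      cases hfind : rest.find? (fun a => PySem.Str.lower a == cand) with
      | some b => rfl
      | none =>
        cases firstSub with
        | some f => simp
        | none =>
          simp only [Option.isNone_none, Bool.true_and]
          by_cases hsub : (PySem.Str.isIn cand (PySem.Str.lower a) ||
              PySem.Str.isIn (PySem.Str.lower a) cand) = true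
          · rw [if_pos hsub,
              List.find?_cons_of_pos
                (p := fun a => let al := PySem.Str.lower a;
                  PySem.Str.isIn cand al || PySem.Str.isIn al cand) hsub]
          · have hsubf : (PySem.Str.isIn cand (PySem.Str.lower a) ||
                PySem.Str.isIn (PySem.Str.lower a) cand) = false := by simpa using hsub
            rw [if_neg hsub,
              List.find?_cons_of_neg
                (p := fun a => let al := PySem.Str.lower a;
                  PySem.Str.isIn cand al || PySem.Str.isIn al cand) hsub]

-- ===== VERDICT (by name: the statement is the Claim_ definition above) =====
theorem match_path_key_py_spec : Claim_equal_match_path_key_py := by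
  intro candidate available _
  unfold Spec_match_path_key_py match_path_key_py match_path_key_py_alt
  by_cases hnil : available = []
  · simp [hnil]
  · rw [if_neg hnil, if_neg hnil, matchPathKeyGo_eq]
    generalize PySem.Str.lower (PySem.Str.strip candidate) = cand
    by_cases hmem : ((available.map (fun a => PySem.Str.lower a)).contains cand) = true
    · -- an exact match exists, so find? returns some
      have hex : ∃ a ∈ available, (PySem.Str.lower a == cand) = true := by
        rw [List.contains_iff_exists_mem_beq] at hmem
        obtain ⟨x, hx, hbeq⟩ := hmem
        obtain ⟨a, ha, rfl⟩ := List.mem_map.mp hx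
        exact ⟨a, ha, beq_iff_eq.mpr (eq_of_beq hbeq).symm⟩
      have hsome : (available.find? (fun a => PySem.Str.lower a == cand)).isSome := by
        exact List.find?_isSome.mpr hex
      rw [if_pos hmem]
      cases hfind : available.find? (fun a => PySem.Str.lower a == cand) with
      | none => rw [hfind] at hsome; simp at hsome
      | some b => rfl
    · -- no exact match: find? exact is none
      have hnone : available.find? (fun a => PySem.Str.lower a == cand) = none := by
        rw [List.find?_eq_none]
        intro a ha hb
        exact hmem (List.contains_iff_exists_mem_beq.mpr
          ⟨PySem.Str.lower a, List.mem_map.mpr ⟨a, ha, rfl⟩, beq_iff_eq.mpr (eq_of_beq hb).symm⟩)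
      rw [if_neg hmem, hnone]
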